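-- pv_equiv track=rewrite | github.com/RepoRoots/JobResumeChanger | utils/resume_analyzer.py | _collect_requirements
-- ===== SOURCE A (Python) =====
-- def _collect_requirements(job_requirements: dict) -> list[dict]:
--     """Collect all requirements into a flat list with metadata."""
--     requirements = []
--
--     # Technologies
--     for tech in job_requirements.get('technologies', []):
--         requirements.append({
--             'keyword': tech,
--             'category': 'technology',
--             'importance': 'required'
--         })
--
--     # Required skills
--     for skill in job_requirements.get('required_skills', []):
--         if skill not in [r['keyword'] for r in requirements]:
--             requirements.append({
--                 'keyword': skill,
--                 'category': 'skill',
--                 'importance': 'required'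
--             })
--
--     # Preferred skills
--     for skill in job_requirements.get('preferred_skills', []):
--         if skill not in [r['keyword'] for r in requirements]:
--             requirements.append({
--                 'keyword': skill,
--                 'category': 'skill',
--                 'importance': 'preferred'
--             })
--
--     # Soft skills
--     for skill in job_requirements.get('soft_skills', []):
--         requirements.append({
--             'keyword': skill,
--             'category': 'soft_skill',
--             'importance': 'required'
--         })
--
--     # Certifications
--     for cert in job_requirements.get('certifications', []):
--         requirements.append({
--             'keyword': cert,
--             'category': 'certification',
--             'importance': 'preferred'
--         })
--
--     # Experience requirements
--     for exp in job_requirements.get('experience_requirements', []):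
--         requirements.append({
--             'keyword': exp,
--             'category': 'experience',
--             'importance': 'required'
--         })
--
--     # Keywords
--     for kw in job_requirements.get('keywords', []):
--         if kw not in [r['keyword'] for r in requirements]:
--             requirements.append({
--                 'keyword': kw,
--                 'category': 'keyword',
--                 'importance': 'preferred'
--             })
--
--     return requirements
-- ===== SOURCE B (Python) =====
-- def _collect_requirements(job_requirements: dict) -> list[dict]:
--     """Collect requirements: generate the full annotated candidate stream, then
--     filter dedup-category candidates by first-occurrence index (computed in a
--     separate dict pass) -- no accumulator-dependent membership tests."""
--     spec = [
--         ('technologies', 'technology', 'required', False),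
--         ('required_skills', 'skill', 'required', True),
--         ('preferred_skills', 'skill', 'preferred', True),
--         ('soft_skills', 'soft_skill', 'required', False),
--         ('certifications', 'certification', 'preferred', False),
--         ('experience_requirements', 'experience', 'required', False),
--         ('keywords', 'keyword', 'preferred', True),
--     ]
--     candidates = [(kw, cat, imp, dd)
--                   for key, cat, imp, dd in spec
--                   for kw in job_requirements.get(key, [])]
--     first = {}
--     for i, (kw, _cat, _imp, _dd) in enumerate(candidates):
--         first.setdefault(kw, i)
--     return [{'keyword': kw, 'category': cat, 'importance': imp}
--             for i, (kw, cat, imp, dd) in enumerate(candidates)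
--             if not dd or first[kw] == i]
-- ===== Notes on version B (the rewrite author's own statement) =====
-- stated objective: alternative
-- what changed: Instead of six sequential category loops whose dedup test rescans the output built so far, B generates the full annotated candidate stream, records each keyword's first-occurrence index in one dict pass, and then filters: a dedup-category candidate is kept exactly at its keyword's first occurrence in the stream, so the keep/drop decision never consults the output.
import Mathlib
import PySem

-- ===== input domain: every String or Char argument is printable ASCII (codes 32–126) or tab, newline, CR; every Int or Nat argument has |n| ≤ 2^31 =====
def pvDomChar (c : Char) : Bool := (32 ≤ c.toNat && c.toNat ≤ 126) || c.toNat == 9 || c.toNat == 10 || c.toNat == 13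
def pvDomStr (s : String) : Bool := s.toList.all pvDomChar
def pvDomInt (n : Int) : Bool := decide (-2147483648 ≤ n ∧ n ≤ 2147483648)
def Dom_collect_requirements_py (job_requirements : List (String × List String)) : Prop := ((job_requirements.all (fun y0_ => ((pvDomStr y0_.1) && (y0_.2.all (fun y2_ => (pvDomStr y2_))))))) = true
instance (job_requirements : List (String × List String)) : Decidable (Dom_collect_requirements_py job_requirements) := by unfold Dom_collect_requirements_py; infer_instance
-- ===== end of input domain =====

-- B replaces A's six sequential category loops (whose dedup test scans the output built
-- so far) by generate-then-filter: build the whole annotated candidate stream, record each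
-- keyword's first-occurrence index in a dict pass, then keep a dedup-category candidate
-- only at its keyword's first occurrence. Objective: alternative (decision per candidate no
-- longer depends on the output being built).

-- ===== PORT A =====
-- r['keyword'] on the requirement dicts A builds (always present; default never used)
def pvKw (r : List (String × String)) : String := (PySem.Dict.get? (PySem.Dict.mk r) "keyword").getD ""

-- the dict literal {'keyword': kw, 'category': cat, 'importance': imp}
def pvMk (kw cat imp : String) : List (String × String) :=
  [("keyword", kw), ("category", cat), ("importance", imp)]

def collect_requirements_py (job_requirements : List (String × List String)) : List (List (String × String)) :=
  -- Technologies
  let reqs := (PySem.Dict.getD (PySem.Dict.mk job_requirements) "technologies" []).foldl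
    (fun acc tech => acc ++ [pvMk tech "technology" "required"]) []
  -- Required skills
  let reqs := (PySem.Dict.getD (PySem.Dict.mk job_requirements) "required_skills" []).foldl
    (fun acc skill => if skill ∈ acc.map pvKw then acc else acc ++ [pvMk skill "skill" "required"]) reqs
  -- Preferred skills
  let reqs := (PySem.Dict.getD (PySem.Dict.mk job_requirements) "preferred_skills" []).foldl
    (fun acc skill => if skill ∈ acc.map pvKw then acc else acc ++ [pvMk skill "skill" "preferred"]) reqs
  -- Soft skills
  let reqs := (PySem.Dict.getD (PySem.Dict.mk job_requirements) "soft_skills" []).foldl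
    (fun acc skill => acc ++ [pvMk skill "soft_skill" "required"]) reqs
  -- Certifications
  let reqs := (PySem.Dict.getD (PySem.Dict.mk job_requirements) "certifications" []).foldl
    (fun acc cert => acc ++ [pvMk cert "certification" "preferred"]) reqs
  -- Experience requirements
  let reqs := (PySem.Dict.getD (PySem.Dict.mk job_requirements) "experience_requirements" []).foldl
    (fun acc exp => acc ++ [pvMk exp "experience" "required"]) reqs
  -- Keywords
  let reqs := (PySem.Dict.getD (PySem.Dict.mk job_requirements) "keywords" []).foldl
    (fun acc kw => if kw ∈ acc.map pvKw then acc else acc ++ [pvMk kw "keyword" "preferred"]) reqs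
  reqs

-- ===== PORT B =====
def pvSpecTable : List (String × String × String × Bool) :=
  [("technologies", "technology", "required", false),
   ("required_skills", "skill", "required", true),
   ("preferred_skills", "skill", "preferred", true),
   ("soft_skills", "soft_skill", "required", false),
   ("certifications", "certification", "preferred", false),
   ("experience_requirements", "experience", "required", false),
   ("keywords", "keyword", "preferred", true)]

-- the nested comprehension: candidates = [(kw, cat, imp, dd) for key,cat,imp,dd in spec for kw in jr.get(key, [])]
def pvCand (job_requirements : List (String × List String)) : List (String × String × String × Bool) :=
  pvSpecTable.flatMap (fun e =>
    (PySem.Dict.getD (PySem.Dict.mk job_requirements) e.1 []).map (fun kw => (kw, e.2.1, e.2.2.1, e.2.2.2)))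

-- first = {}; for i, (kw, …) in enumerate(candidates): first.setdefault(kw, i)
def pvFirst (cand : List (String × String × String × Bool)) : PySem.Dict String Int :=
  (PySem.List.enumerate cand 0).foldl (fun d p => d.setdefault p.2.1 p.1) PySem.Dict.empty

def collect_requirements_py_alt (job_requirements : List (String × List String)) : List (List (String × String)) :=
  let candidates := pvCand job_requirements
  let first := pvFirst candidates
  -- [{…} for i,(kw,cat,imp,dd) in enumerate(candidates) if not dd or first[kw] == i]
  -- (first[kw] never raises: every candidate keyword was inserted in the pass above;
  --  ported as get? compared against some i)
  ((PySem.List.enumerate candidates 0).filter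
      (fun p => !p.2.2.2.2 || (first.get? p.2.1 == some p.1))).map
    (fun p => pvMk p.2.1 p.2.2.1 p.2.2.2.1)

-- ===== PRECONDITION & SPEC =====
def Spec_collect_requirements_py (job_requirements : List (String × List String)) (out : List (List (String × String))) : Prop := out = collect_requirements_py_alt job_requirements
instance (job_requirements : List (String × List String)) (out : List (List (String × String))) : Decidable (Spec_collect_requirements_py job_requirements out) := by unfold Spec_collect_requirements_py; infer_instance

-- ===== CLAIM (what is proved, stated in full; the proofs are below) =====
def Claim_equal_collect_requirements_py : Prop := ∀ (job_requirements : List (String × List String)), Dom_collect_requirements_py job_requirements → Spec_collect_requirements_py job_requirements (collect_requirements_py job_requirements)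

-- ===== LEMMAS AND PROOFS =====

-- A's loop body, uniform over categories: append unless (dedup ∧ keyword already present)
def pvS (acc : List (List (String × String))) (c : String × String × String × Bool) :
    List (List (String × String)) :=
  if c.2.2.2 = true ∧ c.1 ∈ acc.map pvKw then acc else acc ++ [pvMk c.1 c.2.1 c.2.2.1]

theorem pvKw_pvMk (kw cat imp : String) : pvKw (pvMk kw cat imp) = kw := by
  simp [pvKw, pvMk, PySem.Dict.get?]

-- A is the uniform fold over the candidate stream
theorem pvA_eq_fold (jr : List (String × List String)) :
    collect_requirements_py jr = (pvCand jr).foldl pvS [] := by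
  simp [collect_requirements_py, pvCand, pvSpecTable, List.foldl_append, List.foldl_map, pvS]

-- first-occurrence index of k in l, counting from s (what the setdefault pass computes)
def pvFirstAt : List (String × String × String × Bool) → Int → String → Option Int
  | [], _, _ => none
  | c :: t, s, k => if c.1 = k then some s else pvFirstAt t (s + 1) k

theorem pvFold_get? (k : String) :
    ∀ (l : List (String × String × String × Bool)) (s : Int) (d : PySem.Dict String Int),
      ((PySem.List.enumerate l s).foldl (fun d p => d.setdefault p.2.1 p.1) d).get? k =
        match d.get? k with
        | some v => some v
        | none => pvFirstAt l s k := by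
  intro l
  induction l with
  | nil =>
    intro s d
    simp only [PySem.List.enumerate_nil, List.foldl_nil, pvFirstAt]
    cases d.get? k <;> rfl
  | cons c t ih =>
    intro s d
    rw [PySem.List.enumerate_cons, List.foldl_cons, ih]
    by_cases h : c.1 = k
    · subst h
      rw [PySem.Dict.get?_setdefault_self]
      cases hd : d.get? c.1 with
      | some v => simp
      | none => simp [pvFirstAt]
    · rw [PySem.Dict.get?_setdefault_of_ne _ _ (fun he => h he.symm)]
      cases hd : d.get? k with
      | some v => rfl
      | none => simp [pvFirstAt, h]

theorem pvFirst_get? (cand : List (String × String × String × Bool)) (k : String) :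
    (pvFirst cand).get? k = pvFirstAt cand 0 k := by
  rw [pvFirst, pvFold_get? k cand 0 PySem.Dict.empty, PySem.Dict.get?_empty]

theorem pvFirstAt_spec (c : String × String × String × Bool)
    (rest : List (String × String × String × Bool)) :
    ∀ (pre : List (String × String × String × Bool)) (s : Int),
      pvFirstAt (pre ++ c :: rest) s c.1 = some (s + pre.length) ↔ c.1 ∉ pre.map (·.1) := by
  intro pre
  induction pre with
  | nil => intro s; simp [pvFirstAt]
  | cons p t ih =>
    intro s
    simp only [List.cons_append, pvFirstAt, List.map_cons, List.mem_cons, List.length_cons]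
    push_cast
    by_cases h : p.1 = c.1
    · rw [if_pos h]
      constructor
      · intro he
        exact absurd (Option.some.inj he) (by omega)
      · intro hn
        exact absurd (Or.inl h.symm) hn
    · rw [if_neg h, show s + ((t.length : Int) + 1) = (s + 1) + t.length by ring, ih (s + 1)]
      constructor
      · intro hn hc
        rcases hc with hc | hc
        · exact h hc.symm
        · exact hn hc
      · intro hn hc
        exact hn (Or.inr hc)

theorem pvFold_eq_filter (cand : List (String × String × String × Bool)) :
    ∀ (rest pre : List (String × String × String × Bool))
      (acc : List (List (String × String))),
      cand = pre ++ rest →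
      (∀ x : String, x ∈ acc.map pvKw ↔ x ∈ pre.map (·.1)) →
      rest.foldl pvS acc =
        acc ++ ((PySem.List.enumerate rest (pre.length : Int)).filter
            (fun p => !p.2.2.2.2 || ((pvFirst cand).get? p.2.1 == some p.1))).map
          (fun p => pvMk p.2.1 p.2.2.1 p.2.2.2.1) := by
  intro rest
  induction rest with
  | nil =>
    intro pre acc _ _
    simp [PySem.List.enumerate_nil]
  | cons c t ih =>
    intro pre acc hcand hinv
    have hfirst : ((pvFirst cand).get? c.1 == some (pre.length : Int)) = true ↔
        c.1 ∉ pre.map (·.1) := by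
      rw [beq_iff_eq, pvFirst_get?, hcand,
        show some ((pre.length : Int)) = some ((0 : Int) + pre.length) by simp]
      exact pvFirstAt_spec c t pre 0
    have hlen : (((pre ++ [c]).length : Nat) : Int) = (pre.length : Int) + 1 := by
      simp
    have hcand' : cand = (pre ++ [c]) ++ t := by rw [hcand, List.append_assoc]; rfl
    rw [List.foldl_cons, PySem.List.enumerate_cons]
    by_cases hmem : c.1 ∈ acc.map pvKw
    · have hpre : c.1 ∈ pre.map (·.1) := (hinv c.1).mp hmem
      have hinv' : ∀ x : String, x ∈ acc.map pvKw ↔ x ∈ (pre ++ [c]).map (·.1) := by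
        intro x
        rw [hinv x, List.map_append, List.mem_append]
        constructor
        · exact Or.inl
        · rintro (hx | hx)
          · exact hx
          · simp only [List.map_cons, List.map_nil, List.mem_singleton] at hx
            exact hx ▸ hpre
      cases hdd : c.2.2.2 with
      | true =>
        have hS : pvS acc c = acc := by simp [pvS, hdd, hmem]
        have hB : ((pvFirst cand).get? c.1 == some (pre.length : Int)) = false := by
          by_contra hb
          have : ((pvFirst cand).get? c.1 == some (pre.length : Int)) = true := by
            revert hb
            cases ((pvFirst cand).get? c.1 == some (pre.length : Int)) <;> simp
          exact (hfirst.mp this) hpre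
        have hstep := ih (pre ++ [c]) acc hcand' hinv'
        rw [hlen] at hstep
        rw [hS, hstep]
        simp [hdd, hB]
      | false =>
        have hS : pvS acc c = acc ++ [pvMk c.1 c.2.1 c.2.2.1] := by simp [pvS, hdd]
        have hinv2 : ∀ x : String, x ∈ (acc ++ [pvMk c.1 c.2.1 c.2.2.1]).map pvKw ↔
            x ∈ (pre ++ [c]).map (·.1) := by
          intro x
          rw [List.map_append, List.mem_append, List.map_append, List.mem_append]
          simp only [List.map_cons, List.map_nil, List.mem_singleton, pvKw_pvMk]
          rw [hinv x]
        have hstep := ih (pre ++ [c]) (acc ++ [pvMk c.1 c.2.1 c.2.2.1]) hcand' hinv2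
        rw [hlen] at hstep
        rw [hS, hstep]
        simp [hdd, List.append_assoc]
    · have hpre : c.1 ∉ pre.map (·.1) := fun hx => hmem ((hinv c.1).mpr hx)
      have hS : pvS acc c = acc ++ [pvMk c.1 c.2.1 c.2.2.1] := by simp [pvS, hmem]
      have hB : ((pvFirst cand).get? c.1 == some (pre.length : Int)) = true := hfirst.mpr hpre
      have hinv2 : ∀ x : String, x ∈ (acc ++ [pvMk c.1 c.2.1 c.2.2.1]).map pvKw ↔
          x ∈ (pre ++ [c]).map (·.1) := by
        intro x
        rw [List.map_append, List.mem_append, List.map_append, List.mem_append]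
        simp only [List.map_cons, List.map_nil, List.mem_singleton, pvKw_pvMk]
        rw [hinv x]
      have hstep := ih (pre ++ [c]) (acc ++ [pvMk c.1 c.2.1 c.2.2.1]) hcand' hinv2
      rw [hlen] at hstep
      rw [hS, hstep]
      simp [hB, List.append_assoc]

-- ===== VERDICT (by name: the statement is the Claim_ definition above) =====
theorem collect_requirements_py_spec : Claim_equal_collect_requirements_py := by
  intro jr _
  unfold Spec_collect_requirements_py
  rw [pvA_eq_fold]
  have h := pvFold_eq_filter (pvCand jr) (pvCand jr) [] [] rfl (by simp)
  simp only [List.length_nil, Int.natCast_zero, List.nil_append] at h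
  rw [h]
  rfl
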